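-- pv_equiv track=rewrite | github.com/KolmogorovLab/Wakhan | src/cna/purity_ploidy.py | find_p_values_peaks
-- ===== SOURCE A (Python) =====
-- def find_p_values_peaks(p_values):
--     def remove_consecutive_duplicates(data):
--         if not data:
--             return []
--
--         result = [data[0]]
--         for i in range(1, len(data)):
--             if data[i] != data[i - 1]:
--                 result.append(data[i])
--         return result
--
--     def remove_consecutive_diff_1(data):
--         if not data:
--             return []
--
--         result = [data[0]]  # Start with the first element
--         for i in range(1, len(data)):
--             # Only add to result if the difference with the last added value is not 1
--             if abs(data[i] - result[-1]) != 1: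
--                 result.append(data[i])
--         return result
--
--     def find_peaks(data):
--         val = []
--         for i in range(1, len(data) - 1):
--             if data[i] > data[i - 1] and data[i] > data[i + 1]:
--                 val.append(data[i])
--         return val
--
--     data = remove_consecutive_duplicates(p_values)
--     indices = [i for i, val in enumerate(p_values) if val in find_peaks(data)]
--     if len(p_values) == 1:
--         return [0]
--     if p_values[0] > p_values[1]:
--         indices = [0] + indices
--     indices = remove_consecutive_diff_1(indices)
--
--     return indices
-- ===== SOURCE B (Python) =====
-- def find_p_values_peaks(p_values):
--     # One plateau-aware scan collects peak values into a set (instead of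
--     # dedup + find_peaks recomputed per element), then one fused pass builds
--     # the filtered index list.
--     if len(p_values) == 1:
--         return [0]
--     peak_vals = set()
--     rising = False
--     for prev, cur in zip(p_values, p_values[1:]):
--         if cur == prev:
--             continue
--         if cur < prev and rising:
--             peak_vals.add(prev)
--         rising = prev < cur
--     res = [0] if p_values[0] > p_values[1] else []
--     for i, v in enumerate(p_values):
--         if v in peak_vals and (not res or abs(i - res[-1]) != 1):
--             res.append(i)
--     return res
-- ===== Notes on version B (the rewrite author's own statement) =====
-- stated objective: faster
-- what changed: Replaces dedup-then-find_peaks (with find_peaks recomputed inside the membership test for every element) by a single plateau-aware scan over adjacent pairs that collects peak values into a set, and fuses index collection with the consecutive-diff-1 filter into one pass.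
import Mathlib
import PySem

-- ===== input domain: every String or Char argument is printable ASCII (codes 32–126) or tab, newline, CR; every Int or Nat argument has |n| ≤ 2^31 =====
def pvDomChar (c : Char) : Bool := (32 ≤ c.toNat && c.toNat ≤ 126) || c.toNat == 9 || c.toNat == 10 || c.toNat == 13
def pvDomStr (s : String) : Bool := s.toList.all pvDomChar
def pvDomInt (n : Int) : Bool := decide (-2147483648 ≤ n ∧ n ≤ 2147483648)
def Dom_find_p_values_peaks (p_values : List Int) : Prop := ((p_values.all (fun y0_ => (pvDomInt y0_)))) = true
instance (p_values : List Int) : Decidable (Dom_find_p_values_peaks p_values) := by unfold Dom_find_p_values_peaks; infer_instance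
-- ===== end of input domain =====

-- B replaces A's dedup + find_peaks (recomputed per element of p_values) by a single
-- plateau-aware scan collecting peak values into a set, plus one fused filter pass.

-- ===== PORT A =====
-- helper remove_consecutive_duplicates
def pvAdedup (data : List Int) : List Int :=
  if data = [] then []
  else
    (PySem.List.pyRange 1 (data.length : Int) 1).foldl
      (fun result i =>
        if PySem.List.pyGetD data i 0 ≠ PySem.List.pyGetD data (i - 1) 0
        then result ++ [PySem.List.pyGetD data i 0] else result)
      [PySem.List.pyGetD data 0 0]

-- helper remove_consecutive_diff_1 (result[-1] is pyGetD result (-1) 0)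
def pvAdiff1 (data : List Int) : List Int :=
  if data = [] then []
  else
    (PySem.List.pyRange 1 (data.length : Int) 1).foldl
      (fun result i =>
        if (PySem.List.pyGetD data i 0 - PySem.List.pyGetD result (-1) 0).natAbs ≠ 1
        then result ++ [PySem.List.pyGetD data i 0] else result)
      [PySem.List.pyGetD data 0 0]

-- helper find_peaks
def pvApeaks (data : List Int) : List Int :=
  (PySem.List.pyRange 1 ((data.length : Int) - 1) 1).foldl
    (fun val i =>
      if PySem.List.pyGetD data i 0 > PySem.List.pyGetD data (i - 1) 0 ∧
         PySem.List.pyGetD data i 0 > PySem.List.pyGetD data (i + 1) 0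
      then val ++ [PySem.List.pyGetD data i 0] else val)
    []

def find_p_values_peaks (p_values : List Int) : List Int :=
  let data := pvAdedup p_values
  let peaks := pvApeaks data
  let indices := (PySem.List.enumerate p_values 0).foldl
    (fun acc p => if p.2 ∈ peaks then acc ++ [p.1] else acc) []
  if p_values.length = 1 then [0]
  else
    let indices := if PySem.List.pyGetD p_values 0 0 > PySem.List.pyGetD p_values 1 0
                   then [0] ++ indices else indices
    pvAdiff1 indices

-- ===== PORT B =====
-- step of the plateau-aware scan (state: peak-value set, "last distinct step was up")
def pvBstep (st : PySem.Set Int × Bool) (p : Int × Int) : PySem.Set Int × Bool :=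
  if p.2 = p.1 then st
  else ((if p.2 < p.1 ∧ st.2 = true then PySem.Set.add st.1 p.1 else st.1), decide (p.1 < p.2))

def find_p_values_peaks_alt (p_values : List Int) : List Int :=
  if p_values.length = 1 then [0]
  else
    let scan := (p_values.zip (PySem.List.slice p_values (some 1) none)).foldl
      pvBstep (PySem.Set.empty, false)
    let res0 : List Int :=
      if PySem.List.pyGetD p_values 0 0 > PySem.List.pyGetD p_values 1 0 then [0] else []
    (PySem.List.enumerate p_values 0).foldl
      (fun res p =>
        if p.2 ∈ scan.1 ∧ (res = [] ∨ (p.1 - PySem.List.pyGetD res (-1) 0).natAbs ≠ 1)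
        then res ++ [p.1] else res)
      res0

-- ===== PRECONDITION & SPEC =====
-- Pre_ excludes only the empty list, on which Python A (and Python B) raise IndexError at p_values[0].
def Pre_find_p_values_peaks (p_values : List Int) : Prop := p_values ≠ []
instance (p_values : List Int) : Decidable (Pre_find_p_values_peaks p_values) := by
  unfold Pre_find_p_values_peaks; infer_instance
def pvWitness_find_p_values_peaks : List Int := [1, 3, 2]

def Spec_find_p_values_peaks (p_values : List Int) (out : List Int) : Prop := out = find_p_values_peaks_alt p_values
instance (p_values : List Int) (out : List Int) : Decidable (Spec_find_p_values_peaks p_values out) := by unfold Spec_find_p_values_peaks; infer_instance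

-- ===== CLAIM (what is proved, stated in full; the proofs are below) =====
def Claim_equal_find_p_values_peaks : Prop := ∀ (p_values : List Int), Dom_find_p_values_peaks p_values → Pre_find_p_values_peaks p_values → Spec_find_p_values_peaks p_values (find_p_values_peaks p_values)

-- ===== LEMMAS AND PROOFS =====

-- structural run-dedup (first element of each maximal run of equal values)
def dedupS : List Int → List Int
  | [] => []
  | [x] => [x]
  | x :: y :: t => if y = x then dedupS (y :: t) else x :: dedupS (y :: t)

-- strict peaks of a list whose boundary flag says "the head already rose"
def peaksR : Bool → List Int → List Int
  | _, [] => []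
  | _, [_] => []
  | r, b :: c :: t =>
      (if r = true ∧ c < b then [b] else []) ++ peaksR (decide (b < c)) (c :: t)

-- closed form of A's find_peaks as a filter-map over adjacent triples
def peaksT (d : List Int) : List Int :=
  (((d.zip (d.drop 1)).zip (d.drop 2)).filter
    (fun q => decide (q.1.2 > q.1.1 ∧ q.1.2 > q.2))).map (·.1.2)

-- index loop over adjacent pairs = fold over zip with the tail
theorem rangeAdj {β : Type} : ∀ (xs : List Int) (g : β → Int → Int → β) (init : β),
    (List.range (xs.length - 1)).foldl
      (fun acc k => g acc (xs.getD k 0) (xs.getD (k + 1) 0)) init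
    = (xs.zip (xs.drop 1)).foldl (fun acc p => g acc p.1 p.2) init := by
  intro xs
  induction xs with
  | nil => intro g init; simp
  | cons x t ih =>
    cases t with
    | nil => intro g init; simp
    | cons y t' =>
      intro g init
      have hl : (x :: y :: t').length - 1 = t'.length + 1 := by simp
      rw [hl, List.range_succ_eq_map]
      simp only [List.foldl_cons, List.foldl_map, List.getD_cons_zero, List.getD_cons_succ,
        Nat.succ_eq_add_one]
      have := ih g (g init x y)
      simpa using this

theorem adjFold {β : Type} (xs : List Int) (g : β → Int → Int → β) (init : β) :
    (PySem.List.pyRange 1 (xs.length : Int) 1).foldl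
      (fun acc i => g acc (PySem.List.pyGetD xs (i - 1) 0) (PySem.List.pyGetD xs i 0)) init
    = (xs.zip (xs.drop 1)).foldl (fun acc p => g acc p.1 p.2) init := by
  rw [PySem.List.pyRange_one]
  have h : (((xs.length : Int)) - 1).toNat = xs.length - 1 := by omega
  rw [h, List.foldl_map]
  refine Eq.trans (PySem.List.foldl_congr_mem _ _
    (fun acc k => g acc (xs.getD k 0) (xs.getD (k + 1) 0)) _ ?_) (rangeAdj xs g init)
  intro acc k _
  have e2 : (1 : Int) + (k : Int) = ((k + 1 : Nat) : Int) := by push_cast; ring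
  have e1 : ((k + 1 : Nat) : Int) - 1 = ((k : Nat) : Int) := by push_cast; ring
  simp only [e2, e1, PySem.List.pyGetD_natCast]

-- index loop over adjacent triples = fold over the double zip
theorem rangeTrip {β : Type} : ∀ (xs : List Int) (g : β → Int → Int → Int → β) (init : β),
    (List.range (xs.length - 2)).foldl
      (fun acc k => g acc (xs.getD k 0) (xs.getD (k + 1) 0) (xs.getD (k + 2) 0)) init
    = ((xs.zip (xs.drop 1)).zip (xs.drop 2)).foldl
        (fun acc q => g acc q.1.1 q.1.2 q.2) init := by
  intro xs
  induction xs with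
  | nil => intro g init; simp
  | cons x t ih =>
    cases t with
    | nil => intro g init; simp
    | cons y t' =>
      cases t' with
      | nil => intro g init; simp
      | cons z t'' =>
        intro g init
        have hl : (x :: y :: z :: t'').length - 2 = t''.length + 1 := by
          simp [List.length_cons]
        rw [hl, List.range_succ_eq_map]
        simp only [List.foldl_cons, List.foldl_map, List.getD_cons_zero, List.getD_cons_succ,
          Nat.succ_eq_add_one]
        have := ih g (g init x y z)
        simpa using this

theorem tripFold {β : Type} (xs : List Int) (g : β → Int → Int → Int → β) (init : β) :
    (PySem.List.pyRange 1 ((xs.length : Int) - 1) 1).foldl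
      (fun acc i => g acc (PySem.List.pyGetD xs (i - 1) 0) (PySem.List.pyGetD xs i 0)
                      (PySem.List.pyGetD xs (i + 1) 0)) init
    = ((xs.zip (xs.drop 1)).zip (xs.drop 2)).foldl
        (fun acc q => g acc q.1.1 q.1.2 q.2) init := by
  rw [PySem.List.pyRange_one]
  have h : (((xs.length : Int)) - 1 - 1).toNat = xs.length - 2 := by omega
  rw [h, List.foldl_map]
  refine Eq.trans (PySem.List.foldl_congr_mem _ _
    (fun acc k => g acc (xs.getD k 0) (xs.getD (k + 1) 0) (xs.getD (k + 2) 0)) _ ?_)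
    (rangeTrip xs g init)
  intro acc k _
  have e2 : (1 : Int) + (k : Int) = ((k + 1 : Nat) : Int) := by push_cast; ring
  have e1 : ((k + 1 : Nat) : Int) - 1 = ((k : Nat) : Int) := by push_cast; ring
  have e3 : ((k + 1 : Nat) : Int) + 1 = ((k + 2 : Nat) : Int) := by push_cast; ring
  simp only [e2, e1, e3, PySem.List.pyGetD_natCast]

-- A's dedup in closed form
theorem pvAdedup_closed (x : Int) (t : List Int) :
    pvAdedup (x :: t)
    = x :: ((((x :: t).zip t).filter (fun p => decide (p.2 ≠ p.1))).map (·.2)) := by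
  unfold pvAdedup
  rw [if_neg (by simp)]
  refine Eq.trans (adjFold (x :: t) (fun r a b => if b ≠ a then r ++ [b] else r) _) ?_
  have h0 : PySem.List.pyGetD (x :: t) 0 0 = x := by
    simp [PySem.List.pyGetD_ofNat']
  rw [h0, List.drop_one]
  rw [PySem.List.foldl_append_ite (p := fun p : Int × Int => p.2 ≠ p.1) (f := fun p => p.2)]
  simp

theorem dedupS_closed : ∀ (t : List Int) (x : Int),
    dedupS (x :: t) = x :: ((((x :: t).zip t).filter (fun p => decide (p.2 ≠ p.1))).map (·.2)) := by
  intro t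
  induction t with
  | nil => intro x; simp [dedupS]
  | cons y t' ih =>
    intro x
    by_cases h : y = x
    · subst h
      simp only [dedupS, ih y]
      simp
    · simp only [dedupS, if_neg h, ih y]
      simp [h]

theorem dedupS_head (t : List Int) (x : Int) : ∃ r, dedupS (x :: t) = x :: r :=
  ⟨_, dedupS_closed t x⟩

theorem dedupS_chain : ∀ (xs : List Int), List.IsChain (· ≠ ·) (dedupS xs) := by
  intro xs
  induction xs with
  | nil => simp [dedupS]
  | cons x t ih =>
    cases t with
    | nil => simp [dedupS]
    | cons y t' =>
      simp only [dedupS]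
      by_cases h : y = x
      · rw [if_pos h]; exact ih
      · rw [if_neg h]
        obtain ⟨r, hr⟩ := dedupS_head t' y
        rw [hr] at ih ⊢
        exact List.isChain_cons_cons.mpr ⟨fun hxy => h hxy.symm, ih⟩

-- the distinct adjacent pairs of xs are exactly the adjacent pairs of dedupS xs
theorem pairs_filter_dedup : ∀ (xs : List Int),
    (xs.zip (xs.drop 1)).filter (fun p => decide (p.2 ≠ p.1))
    = (dedupS xs).zip ((dedupS xs).drop 1) := by
  intro xs
  induction xs with
  | nil => simp [dedupS]
  | cons x t ih =>
    cases t with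
    | nil => simp [dedupS]
    | cons y t' =>
      simp only [dedupS]
      by_cases h : y = x
      · rw [if_pos h]
        subst h
        simpa using ih
      · rw [if_neg h]
        obtain ⟨r, hr⟩ := dedupS_head t' y
        rw [hr] at ih ⊢
        simp only [List.drop_succ_cons, List.drop_zero, List.zip_cons_cons,
          List.filter_cons] at ih ⊢
        have hx : decide ((x, y).2 ≠ (x, y).1) = true := by simp [h]
        simp only [hx, if_true]
        rw [ih]

-- A's find_peaks is peaksT
theorem pvApeaks_eq_peaksT (d : List Int) : pvApeaks d = peaksT d := by
  unfold pvApeaks peaksT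
  refine Eq.trans (tripFold d (fun val a b c => if b > a ∧ b > c then val ++ [b] else val) []) ?_
  rw [PySem.List.foldl_append_ite
    (p := fun q : (Int × Int) × Int => q.1.2 > q.1.1 ∧ q.1.2 > q.2) (f := fun q => q.1.2)]
  simp

-- peaksT satisfies peaksR's recursion
theorem peaksT_cons (a b c : Int) (t : List Int) :
    peaksT (a :: b :: c :: t) = (if a < b ∧ c < b then [b] else []) ++ peaksT (b :: c :: t) := by
  by_cases h : a < b ∧ c < b <;>
    simp [peaksT, gt_iff_lt, h]

theorem peaksR_eq_peaksT_aux : ∀ (t : List Int) (a b c : Int),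
    peaksR (decide (a < b)) (b :: c :: t) = peaksT (a :: b :: c :: t) := by
  intro t
  induction t with
  | nil =>
    intro a b c
    rw [peaksT_cons]
    simp [peaksR, peaksT]
  | cons e t' ih =>
    intro a b c
    rw [peaksT_cons]
    rw [show peaksR (decide (a < b)) (b :: c :: e :: t')
        = (if decide (a < b) = true ∧ c < b then [b] else [])
          ++ peaksR (decide (b < c)) (c :: e :: t') from rfl]
    rw [ih b c e]
    simp

theorem peaksR_false_eq_peaksT : ∀ (d : List Int), peaksR false d = peaksT d := by
  intro d
  cases d with
  | nil => simp [peaksR, peaksT]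
  | cons x d1 =>
    cases d1 with
    | nil => simp [peaksR, peaksT]
    | cons y d2 =>
      cases d2 with
      | nil => simp [peaksR, peaksT]
      | cons c t =>
        have h := peaksR_eq_peaksT_aux t x y c
        rw [show peaksR false (x :: y :: c :: t)
            = (if false = true ∧ y < x then [x] else [])
              ++ peaksR (decide (x < y)) (y :: c :: t) from rfl]
        simpa using h

-- the scan over the adjacent pairs of a duplicate-free list collects exactly peaksR
theorem scan_mem : ∀ (d : List Int), List.IsChain (· ≠ ·) d →
    ∀ (S : PySem.Set Int) (r : Bool) (v : Int),
      v ∈ ((d.zip (d.drop 1)).foldl pvBstep (S, r)).1 ↔ v ∈ S ∨ v ∈ peaksR r d := by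
  intro d
  induction d with
  | nil => intro _ S r v; simp [peaksR]
  | cons b t ih =>
    cases t with
    | nil => intro _ S r v; simp [peaksR]
    | cons c t' =>
      intro hch S r v
      rw [List.isChain_cons_cons] at hch
      obtain ⟨hbc, hch'⟩ := hch
      simp only [List.drop_succ_cons, List.drop_zero, List.zip_cons_cons, List.foldl_cons]
      have hstep : pvBstep (S, r) (b, c) =
          ((if c < b ∧ r = true then PySem.Set.add S b else S), decide (b < c)) := by
        simp [pvBstep, Ne.symm hbc]
      rw [hstep]
      have ihh := ih hch' (if c < b ∧ r = true then PySem.Set.add S b else S) (decide (b < c)) v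
      simp only [List.drop_succ_cons, List.drop_zero] at ihh
      rw [ihh]
      simp only [peaksR]
      by_cases hc : c < b
      · by_cases hr : r = true
        · simp [hc, hr, PySem.Set.mem_add]
          tauto
        · simp [hc, hr]
      · have : ¬ (c < b ∧ r = true) := fun hh => hc hh.1
        have h2 : ¬ (r = true ∧ c < b) := fun hh => hc hh.2
        simp [this, h2]

-- B's scan collects exactly the values of A's peaks list
theorem scan_eq_peaks (xs : List Int) (v : Int) :
    v ∈ ((xs.zip (xs.drop 1)).foldl pvBstep (PySem.Set.empty, false)).1
    ↔ v ∈ pvApeaks (pvAdedup xs) := by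
  cases xs with
  | nil =>
    have h1 : pvAdedup ([] : List Int) = [] := rfl
    have h2 : pvApeaks ([] : List Int) = [] := rfl
    rw [h1, h2]
    simp [PySem.Set.empty]
  | cons x t =>
    have hstep : ∀ (acc : PySem.Set Int × Bool), ∀ p ∈ ((x :: t).zip ((x :: t).drop 1)),
        pvBstep acc p = if p.2 ≠ p.1 then pvBstep acc p else acc := by
      intro acc p _
      by_cases h : p.2 = p.1 <;> simp [pvBstep, h]
    rw [PySem.List.foldl_congr_mem _ _ _ _ hstep]
    rw [PySem.List.foldl_ite_eq_foldl_filter (p := fun p : Int × Int => p.2 ≠ p.1) pvBstep]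
    rw [pairs_filter_dedup]
    rw [scan_mem _ (dedupS_chain _)]
    have hd : pvAdedup (x :: t) = dedupS (x :: t) := by
      rw [pvAdedup_closed, dedupS_closed]
    rw [hd, pvApeaks_eq_peaksT, peaksR_false_eq_peaksT]
    simp [PySem.Set.empty]

-- fused filter pass: once nonempty, B's step is A's diff-1 step
theorem fuse_ne : ∀ (m res : List Int), res ≠ [] →
    m.foldl (fun res i => if res = [] ∨ (i - PySem.List.pyGetD res (-1) 0).natAbs ≠ 1
                          then res ++ [i] else res) res
    = m.foldl (fun result i =>
        if (i - PySem.List.pyGetD result (-1) 0).natAbs ≠ 1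
        then result ++ [i] else result) res := by
  intro m
  induction m with
  | nil => intro res _; simp
  | cons i m' ih =>
    intro res h
    simp only [List.foldl_cons]
    have hcond : (if res = [] ∨ (i - PySem.List.pyGetD res (-1) 0).natAbs ≠ 1
                  then res ++ [i] else res)
               = (if (i - PySem.List.pyGetD res (-1) 0).natAbs ≠ 1
                  then res ++ [i] else res) := by
      refine if_congr ?_ rfl rfl
      simp [h]
    rw [hcond]
    by_cases hx : (i - PySem.List.pyGetD res (-1) 0).natAbs ≠ 1
    · rw [if_pos hx]
      exact ih _ (by simp)
    · rw [if_neg hx]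
      exact ih _ h

-- A's remove_consecutive_diff_1 as a structural fold
theorem pvAdiff1_closed (a : Int) (l : List Int) :
    pvAdiff1 (a :: l)
    = l.foldl (fun result i =>
        if (i - PySem.List.pyGetD result (-1) 0).natAbs ≠ 1
        then result ++ [i] else result) [a] := by
  unfold pvAdiff1
  rw [if_neg (by simp)]
  have h0 : PySem.List.pyGetD (a :: l) 0 0 = a := by
    simp [PySem.List.pyGetD_ofNat']
  rw [h0]
  have h := PySem.List.foldl_pyRange_pyGetD' (xs := a :: l) (d := 0)
    (f := fun result v =>
      if (v - PySem.List.pyGetD result (-1) 0).natAbs ≠ 1 then result ++ [v] else result)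
    (init := [a]) (a := 1) (by norm_num)
  simpa using h

theorem fuse_eq (m res0 : List Int) (h : res0 = [] ∨ res0 = [0]) :
    m.foldl (fun res i => if res = [] ∨ (i - PySem.List.pyGetD res (-1) 0).natAbs ≠ 1
                          then res ++ [i] else res) res0
    = pvAdiff1 (res0 ++ m) := by
  rcases h with h | h
  · subst h
    cases m with
    | nil => simp [pvAdiff1]
    | cons i m' =>
      rw [List.nil_append, List.foldl_cons, if_pos (Or.inl rfl)]
      rw [fuse_ne m' ([] ++ [i]) (by simp)]
      rw [pvAdiff1_closed]
      simp
  · subst h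
    rw [fuse_ne m [0] (by simp)]
    have : ([0] ++ m : List Int) = 0 :: m := by simp
    rw [this, pvAdiff1_closed]

-- ===== VERDICT (by name: the statement is the Claim_ definition above) =====
theorem find_p_values_peaks_spec : Claim_equal_find_p_values_peaks := by
  intro xs _ hpre
  unfold Spec_find_p_values_peaks
  cases xs with
  | nil => exact absurd rfl hpre
  | cons x t =>
    cases t with
    | nil =>
      simp [find_p_values_peaks, find_p_values_peaks_alt]
    | cons y t' =>
      have hne : ¬ ((x :: y :: t').length = 1) := by simp
      have hslice : PySem.List.slice (x :: y :: t') (some 1) none = (x :: y :: t').drop 1 := by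
        simp [PySem.List.slice_from]
      unfold find_p_values_peaks find_p_values_peaks_alt
      simp only [hslice]
      rw [if_neg hne, if_neg hne]
      -- abbreviations
      set P := x :: y :: t' with hP
      set peaks := pvApeaks (pvAdedup P) with hpk
      set scn := (P.zip (P.drop 1)).foldl pvBstep (PySem.Set.empty, false) with hscn
      -- A's index list in closed form
      rw [PySem.List.foldl_append_ite (p := fun p : Int × Int => p.2 ∈ peaks)
        (f := fun p : Int × Int => p.1)]
      rw [List.nil_append]
      set m := ((PySem.List.enumerate P 0).filter
        (fun p : Int × Int => decide (p.2 ∈ peaks))).map (fun p : Int × Int => p.1) with hm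
      set res0 : List Int :=
        if PySem.List.pyGetD P 0 0 > PySem.List.pyGetD P 1 0 then [0] else [] with hres0
      -- B side: replace the set-membership test by membership in A's peak list
      have hcongr : ∀ (res : List Int), ∀ p ∈ PySem.List.enumerate P 0,
          (if p.2 ∈ scn.1 ∧ (res = [] ∨ (p.1 - PySem.List.pyGetD res (-1) 0).natAbs ≠ 1)
           then res ++ [p.1] else res)
        = (if p.2 ∈ peaks then
             (if res = [] ∨ (p.1 - PySem.List.pyGetD res (-1) 0).natAbs ≠ 1
              then res ++ [p.1] else res)
           else res) := by
        intro res p _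
        have hmem : p.2 ∈ scn.1 ↔ p.2 ∈ peaks := scan_eq_peaks P p.2
        by_cases h1 : p.2 ∈ peaks
        · have h1' : p.2 ∈ scn.1 := hmem.mpr h1
          by_cases h2 : res = [] ∨ (p.1 - PySem.List.pyGetD res (-1) 0).natAbs ≠ 1 <;>
            simp [h1, h1', h2]
        · have h1' : ¬ p.2 ∈ scn.1 := fun hh => h1 (hmem.mp hh)
          simp [h1, h1']
      rw [PySem.List.foldl_congr_mem _ _ _ _ hcongr]
      rw [PySem.List.foldl_ite_eq_foldl_filter (p := fun p : Int × Int => p.2 ∈ peaks)]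
      have hmap : List.foldl
          (fun (acc : List Int) (p : Int × Int) =>
            if acc = [] ∨ (p.1 - PySem.List.pyGetD acc (-1) 0).natAbs ≠ 1
            then acc ++ [p.1] else acc) res0
          ((PySem.List.enumerate P 0).filter (fun p : Int × Int => decide (p.2 ∈ peaks)))
        = List.foldl
          (fun (res : List Int) (i : Int) =>
            if res = [] ∨ (i - PySem.List.pyGetD res (-1) 0).natAbs ≠ 1
            then res ++ [i] else res) res0 m := by
        rw [hm]
        exact (List.foldl_map (f := fun p : Int × Int => p.1)
          (g := fun (res : List Int) (i : Int) =>
            if res = [] ∨ (i - PySem.List.pyGetD res (-1) 0).natAbs ≠ 1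
            then res ++ [i] else res)).symm
      rw [hmap]
      rw [fuse_eq m res0 (by by_cases hc : PySem.List.pyGetD P 0 0 > PySem.List.pyGetD P 1 0 <;>
        simp [hres0, hc])]
      -- A side: fold the prepended 0 into res0
      by_cases hc : PySem.List.pyGetD P 0 0 > PySem.List.pyGetD P 1 0
      · rw [if_pos hc, hres0, if_pos hc]
      · rw [if_neg hc, hres0, if_neg hc]
        simp
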